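-- pv_equiv track=rewrite | github.com/puxos/esg-quantitative-research | qx/common/enum_validator.py | suggest_similar
-- ===== SOURCE A (Python) =====
-- from typing import Any, Dict, List, Optional, Type, Union
--
-- def suggest_similar(
--     value: str, valid_values: List[str], max_suggestions: int = 3
-- ) -> List[str]:
--     """
--     Suggest similar valid values based on string similarity.
--
--     Args:
--         value: The invalid value
--         valid_values: List of valid values
--         max_suggestions: Maximum number of suggestions to return
--
--     Returns:
--         List of suggested valid values
--
--     Example:
--         >>> suggest_similar("daiy", ["daily", "weekly", "monthly"])
--         ['daily']
--     """
--     if not isinstance(value, str):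
--         return []
--
--     value_lower = value.lower()
--
--     # Check for exact prefix matches
--     prefix_matches = [v for v in valid_values if v.startswith(value_lower)]
--     if prefix_matches:
--         return prefix_matches[:max_suggestions]
--
--     # Check for substring matches
--     substring_matches = [
--         v for v in valid_values if value_lower in v or v in value_lower
--     ]
--     if substring_matches:
--         return substring_matches[:max_suggestions]
--
--     # Return first few valid values as fallback
--     return valid_values[:max_suggestions]
-- ===== SOURCE B (Python) =====
-- def suggest_similar(value, valid_values, max_suggestions=3):
--     if not isinstance(value, str):
--         return []
--     value_lower = value.lower()
--
--     def rank(v):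
--         # tier of a candidate: 0 = prefix match, 1 = substring match, 2 = anything
--         if v.startswith(value_lower):
--             return 0
--         if value_lower in v or v in value_lower:
--             return 1
--         return 2
--
--     ranks = [rank(v) for v in valid_values]
--     best = min(ranks, default=2)
--     return [v for v, r in zip(valid_values, ranks) if r == best][:max_suggestions]
-- ===== Notes on version B (the rewrite author's own statement) =====
-- stated objective: alternative
-- what changed: Replaced A's staged scans (prefix filter, else substring filter, else fallback) by a rank-and-select algorithm: each candidate is scored once into a ranks list (0 prefix, 1 substring, 2 otherwise), the global minimum rank is taken with min(ranks, default=2), and one zip-filter keeps the candidates attaining it.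
import Mathlib
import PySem

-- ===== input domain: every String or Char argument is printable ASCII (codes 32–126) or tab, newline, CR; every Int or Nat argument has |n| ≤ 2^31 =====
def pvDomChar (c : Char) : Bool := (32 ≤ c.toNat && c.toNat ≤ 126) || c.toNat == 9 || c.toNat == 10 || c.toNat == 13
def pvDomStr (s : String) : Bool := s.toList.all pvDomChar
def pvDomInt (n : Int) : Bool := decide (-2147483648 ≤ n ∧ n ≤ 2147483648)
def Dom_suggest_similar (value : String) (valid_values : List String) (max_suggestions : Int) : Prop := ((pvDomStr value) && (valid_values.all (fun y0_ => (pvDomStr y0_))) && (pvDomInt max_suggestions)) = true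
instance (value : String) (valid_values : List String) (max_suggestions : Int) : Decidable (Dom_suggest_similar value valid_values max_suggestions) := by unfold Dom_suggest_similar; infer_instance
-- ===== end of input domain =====

-- B replaces A's staged scans by a per-candidate tier score (0 prefix / 1 substring / 2 other),
-- a global minimum, and one threshold filter; objective: alternative (same cost, different algorithm).

-- ===== PORT A =====
-- Port of A: two filter passes (prefix, then substring), then fallback slice.
-- The isinstance(value, str) guard is always true under the type convention.
def suggest_similar (value : String) (valid_values : List String) (max_suggestions : Int) : List String :=
  let value_lower := PySem.Str.lower value
  let prefix_matches := valid_values.filter (fun v => PySem.Str.startswith v value_lower)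
  if prefix_matches ≠ [] then PySem.List.slice prefix_matches none (some max_suggestions)
  else
    let substring_matches := valid_values.filter
      (fun v => PySem.Str.isIn value_lower v || PySem.Str.isIn v value_lower)
    if substring_matches ≠ [] then PySem.List.slice substring_matches none (some max_suggestions)
    else PySem.List.slice valid_values none (some max_suggestions)

-- ===== PORT B =====
-- Port of B: rank each candidate once, take min(ranks, default=2), keep candidates of the best rank.
def pvRankB (value_lower v : String) : Int :=
  if PySem.Str.startswith v value_lower then 0
  else if PySem.Str.isIn value_lower v || PySem.Str.isIn v value_lower then 1
  else 2

def suggest_similar_alt (value : String) (valid_values : List String) (max_suggestions : Int) : List String :=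
  let value_lower := PySem.Str.lower value
  let ranks := valid_values.map (pvRankB value_lower)
  let best := PySem.List.minD ranks (fun x => x) 2
  PySem.List.slice (((valid_values.zip ranks).filter (fun p => p.2 == best)).map (fun p => p.1))
    none (some max_suggestions)

-- ===== PRECONDITION & SPEC =====
def Spec_suggest_similar (value : String) (valid_values : List String) (max_suggestions : Int) (out : List String) : Prop := out = suggest_similar_alt value valid_values max_suggestions
instance (value : String) (valid_values : List String) (max_suggestions : Int) (out : List String) : Decidable (Spec_suggest_similar value valid_values max_suggestions out) := by unfold Spec_suggest_similar; infer_instance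

-- ===== CLAIM (what is proved, stated in full; the proofs are below) =====
def Claim_equal_suggest_similar : Prop := ∀ (value : String) (valid_values : List String) (max_suggestions : Int), Dom_suggest_similar value valid_values max_suggestions → Spec_suggest_similar value valid_values max_suggestions (suggest_similar value valid_values max_suggestions)

-- ===== LEMMAS AND PROOFS =====

-- min(xs, default=2) = c when c is a member and a lower bound.
theorem minD_id_eq_of (xs : List Int) (c : Int) (hmem : c ∈ xs) (hlb : ∀ x ∈ xs, c ≤ x) :
    PySem.List.minD xs (fun x => x) 2 = c := by
  cases h : PySem.List.min? xs (fun x : Int => x) with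
  | none =>
      rw [(PySem.List.min?_eq_none_iff xs _).mp h] at hmem
      simp at hmem
  | some m =>
      have h1 : m ≤ c := PySem.List.min?_isMin h c hmem
      have h2 : c ≤ m := hlb m (PySem.List.min?_mem h)
      simp [PySem.List.minD, h]
      omega

-- The heart of the equivalence, over arbitrary Bool predicates: A's staged
-- "filter P, else filter Q, else all" equals B's "keep the candidates whose
-- rank (0 if P, 1 if Q, else 2) attains min(ranks, default=2)".
theorem tiered_eq_rank {α : Type} (l : List α) (P Q : α → Bool) (ms : Int) :
    (if l.filter P ≠ [] then PySem.List.slice (l.filter P) none (some ms)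
     else if l.filter Q ≠ [] then PySem.List.slice (l.filter Q) none (some ms)
     else PySem.List.slice l none (some ms))
    = PySem.List.slice
        (l.filter (fun v => (if P v then (0 : Int) else if Q v then 1 else 2)
            == PySem.List.minD (l.map (fun v => if P v then (0 : Int) else if Q v then 1 else 2))
                 (fun x => x) 2))
        none (some ms) := by
  set R : α → Int := fun v => if P v then (0 : Int) else if Q v then 1 else 2 with hR
  have hRval : ∀ v, R v = 0 ∨ R v = 1 ∨ R v = 2 := by
    intro v; rw [hR]; simp only; split
    · left; rfl
    · split
      · right; left; rfl
      · right; right; rfl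
  by_cases hpre : l.filter P = []
  · have hnoP : ∀ v ∈ l, P v = false := by
      intro v hv; simpa using (List.filter_eq_nil_iff.mp hpre v hv)
    by_cases hsub : l.filter Q = []
    · -- no match at all: every rank is 2, fallback slice of the whole list
      have hnoQ : ∀ v ∈ l, Q v = false := by
        intro v hv; simpa using (List.filter_eq_nil_iff.mp hsub v hv)
      have hrank2 : ∀ v ∈ l, R v = 2 := by
        intro v hv; rw [hR]; simp [hnoP v hv, hnoQ v hv]
      have hbest : PySem.List.minD (l.map R) (fun x => x) 2 = 2 := by
        cases hl : l with
        | nil => rfl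
        | cons a t =>
            apply minD_id_eq_of
            · exact List.mem_map.mpr ⟨a, by simp, hrank2 a (by simp [hl])⟩
            · intro x hx
              obtain ⟨v, hv, rfl⟩ := List.mem_map.mp hx
              rw [hrank2 v (by rw [hl]; exact hv)]
      rw [if_neg (by simpa using hpre), if_neg (by simpa using hsub), hbest]
      have hfe : l.filter (fun v => R v == 2) = l :=
        List.filter_eq_self.mpr (fun v hv => by rw [hrank2 v hv]; rfl)
      rw [hfe]
    · -- substring tier wins: the minimum rank is 1
      obtain ⟨w, hw, hwQ⟩ : ∃ v ∈ l, Q v = true := by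
        rcases List.ne_nil_iff_exists_cons.mp hsub with ⟨a, t, he⟩
        have ha : a ∈ l.filter Q := by rw [he]; exact List.mem_cons_self
        exact ⟨a, (List.mem_filter.mp ha).1, (List.mem_filter.mp ha).2⟩
      have hbest : PySem.List.minD (l.map R) (fun x => x) 2 = 1 := by
        apply minD_id_eq_of
        · exact List.mem_map.mpr ⟨w, hw, by rw [hR]; simp [hnoP w hw, hwQ]⟩
        · intro x hx
          obtain ⟨v, hv, rfl⟩ := List.mem_map.mp hx
          have h0 : R v ≠ 0 := by
            rw [hR]; simp only [hnoP v hv, Bool.false_eq_true, if_false]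
            split <;> omega
          rcases hRval v with h | h | h
          · exact absurd h h0
          · omega
          · omega
      rw [if_neg (by simpa using hpre), if_pos (by simpa using hsub), hbest]
      have hfe : l.filter (fun v => R v == 1) = l.filter Q := by
        apply List.filter_congr
        intro v hv
        rw [hR]; simp only [hnoP v hv]
        cases hq : Q v <;> simp
      rw [hfe]
  · -- prefix tier wins: the minimum rank is 0
    obtain ⟨w, hw, hwP⟩ : ∃ v ∈ l, P v = true := by
      rcases List.ne_nil_iff_exists_cons.mp hpre with ⟨a, t, he⟩
      have ha : a ∈ l.filter P := by rw [he]; exact List.mem_cons_self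
      exact ⟨a, (List.mem_filter.mp ha).1, (List.mem_filter.mp ha).2⟩
    have hbest : PySem.List.minD (l.map R) (fun x => x) 2 = 0 := by
      apply minD_id_eq_of
      · exact List.mem_map.mpr ⟨w, hw, by rw [hR]; simp [hwP]⟩
      · intro x hx
        obtain ⟨v, hv, rfl⟩ := List.mem_map.mp hx
        rcases hRval v with h | h | h <;> omega
    rw [if_pos (by simpa using hpre), hbest]
    have hfe : l.filter (fun v => R v == 0) = l.filter P := by
      apply List.filter_congr
      intro v hv
      rw [hR]
      cases hp : P v with
      | true => simp [hp]
      | false =>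
          simp only [hp, Bool.false_eq_true, if_false]
          split <;> rfl
    rw [hfe]

-- Filtering the zipped (element, cached rank) pairs and projecting equals filtering by the rank.
theorem zip_map_filter_fst {α : Type} (l : List α) (R : α → Int) (b : Int) :
    (((l.zip (l.map R)).filter (fun q => q.2 == b)).map (fun q => q.1))
      = l.filter (fun v => R v == b) := by
  induction l with
  | nil => rfl
  | cons a t ih =>
      simp only [List.map_cons, List.zip_cons_cons, List.filter_cons]
      by_cases h : R a == b <;> simp [h, ih]

-- ===== VERDICT (by name: the statement is the Claim_ definition above) =====
theorem suggest_similar_spec : Claim_equal_suggest_similar := by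
  intro value valid_values max_suggestions _
  unfold Spec_suggest_similar suggest_similar suggest_similar_alt
  show (if _ ≠ [] then _ else _) = PySem.List.slice (((valid_values.zip (valid_values.map (pvRankB (PySem.Str.lower value)))).filter (fun p => p.2 == PySem.List.minD (valid_values.map (pvRankB (PySem.Str.lower value))) (fun x => x) 2)).map (fun p => p.1)) none (some max_suggestions)
  rw [zip_map_filter_fst]
  exact tiered_eq_rank valid_values
    (fun v => PySem.Str.startswith v (PySem.Str.lower value))
    (fun v => PySem.Str.isIn (PySem.Str.lower value) v || PySem.Str.isIn v (PySem.Str.lower value))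
    max_suggestions
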